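-- pv_equiv track=rewrite | github.com/shaug/atelier | src/atelier/changesets.py | _set_field
-- ===== SOURCE A (Python) =====
-- def _set_field(description: str, key: str, value: str | None) -> str:
--     lines = description.splitlines() if description else []
--     updated: list[str] = []
--     needle = f"{key}:"
--     found = False
--     for line in lines:
--         if line.strip().startswith(needle):
--             if not found:
--                 replacement = value if value is not None else "null"
--                 updated.append(f"{key}: {replacement}")
--                 found = True
--             continue
--         updated.append(line)
--     if not found:
--         replacement = value if value is not None else "null"
--         updated.append(f"{key}: {replacement}")
--     return "\n".join(updated).rstrip("\n") + "\n"
-- ===== SOURCE B (Python) =====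
-- def _set_field(description: str, key: str, value: str | None) -> str:
--     lines = description.splitlines() if description else []
--     needle = f"{key}:"
--     replacement = f"{key}: {value if value is not None else 'null'}"
--     idx = next((i for i, l in enumerate(lines) if l.strip().startswith(needle)), None)
--     kept = [l for l in lines if not l.strip().startswith(needle)]
--     if idx is None:
--         kept.append(replacement)
--     else:
--         kept.insert(idx, replacement)
--     return "\n".join(kept).rstrip("\n") + "\n"
-- ===== Notes on version B (the rewrite author's own statement) =====
-- stated objective: simpler
-- what changed: Replaces A's single stateful loop carrying a 'found' flag by a stateless decomposition: find the first matching index, filter out all matching lines with a comprehension, then insert the one replacement at that index (or append).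
import Mathlib
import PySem

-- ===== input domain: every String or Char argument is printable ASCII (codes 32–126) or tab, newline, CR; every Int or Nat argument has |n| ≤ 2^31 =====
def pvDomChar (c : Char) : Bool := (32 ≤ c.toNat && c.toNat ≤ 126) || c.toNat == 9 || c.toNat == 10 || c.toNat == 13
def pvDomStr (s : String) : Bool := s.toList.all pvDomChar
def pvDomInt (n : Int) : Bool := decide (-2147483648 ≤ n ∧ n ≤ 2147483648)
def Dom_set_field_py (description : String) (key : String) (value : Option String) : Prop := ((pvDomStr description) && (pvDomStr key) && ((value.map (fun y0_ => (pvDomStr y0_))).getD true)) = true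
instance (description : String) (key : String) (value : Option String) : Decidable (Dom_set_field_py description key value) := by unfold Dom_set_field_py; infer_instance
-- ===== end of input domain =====

-- B replaces A's stateful loop (a 'found' flag threaded through one pass) by a stateless
-- find-index / filter / insert decomposition; same O(n) cost, simpler to read.

-- s.rstrip("\n"): drop trailing '\n' characters (exact: Python rstrip with an explicit char set)
def pyRstripNL (s : String) : String := String.ofList ((s.toList.reverse.dropWhile (· == '\n')).reverse)

-- ===== PORT A =====
def set_field_py (description : String) (key : String) (value : Option String) : String :=
  let lines := if description ≠ "" then PySem.Str.splitlines description else []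
  let needle := key ++ ":"
  let st := lines.foldl (fun (st : List String × Bool) line =>
      if PySem.Str.startswith (PySem.Str.strip line) needle then
        (if !st.2 then (st.1 ++ [key ++ ": " ++ value.getD "null"], true) else st)
      else (st.1 ++ [line], st.2)) ([], false)
  let updated := if !st.2 then st.1 ++ [key ++ ": " ++ value.getD "null"] else st.1
  pyRstripNL (PySem.Str.join "\n" updated) ++ "\n"

-- ===== PORT B =====
def set_field_py_alt (description : String) (key : String) (value : Option String) : String :=
  let lines := if description ≠ "" then PySem.Str.splitlines description else []
  let needle := key ++ ":"
  let replacement := key ++ ": " ++ value.getD "null"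
  let idx := lines.findIdx? (fun l => PySem.Str.startswith (PySem.Str.strip l) needle)
  let kept := lines.filter (fun l => !(PySem.Str.startswith (PySem.Str.strip l) needle))
  let res := match idx with
    | none => kept ++ [replacement]
    | some i => PySem.List.insert kept (i : Int) replacement
  pyRstripNL (PySem.Str.join "\n" res) ++ "\n"

-- ===== PRECONDITION & SPEC =====
def Spec_set_field_py (description : String) (key : String) (value : Option String) (out : String) : Prop := out = set_field_py_alt description key value
instance (description : String) (key : String) (value : Option String) (out : String) : Decidable (Spec_set_field_py description key value out) := by unfold Spec_set_field_py; infer_instance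

-- ===== CLAIM (what is proved, stated in full; the proofs are below) =====
def Claim_equal_set_field_py : Prop := ∀ (description : String) (key : String) (value : Option String), Dom_set_field_py description key value → Spec_set_field_py description key value (set_field_py description key value)

-- ===== LEMMAS AND PROOFS =====

-- what A's loop-body does to the state (named so the lemmas below can be applied by defeq)
def stepA {α : Type} (m : α → Bool) (rep : α) (st : List α × Bool) (line : α) : List α × Bool :=
  if m line then (if !st.2 then (st.1 ++ [rep], true) else st) else (st.1 ++ [line], st.2)

-- what A's loop produces starting with found = false
def gAux {α : Type} (m : α → Bool) (rep : α) : List α → List α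
  | [] => []
  | l :: ls => if m l then rep :: ls.filter (fun x => !m x) else l :: gAux m rep ls

theorem foldA_eq {α : Type} (m : α → Bool) (rep : α) (lines : List α) (acc : List α) (b : Bool) :
    lines.foldl (stepA m rep) (acc, b)
    = (acc ++ (if b then lines.filter (fun l => !m l) else gAux m rep lines),
       b || lines.any m) := by
  induction lines generalizing acc b with
  | nil => simp [gAux]
  | cons l ls ih =>
    rw [List.foldl_cons]
    by_cases hm : m l
    · cases b
      · rw [show stepA m rep (acc, false) l = (acc ++ [rep], true) from by simp [stepA, hm], ih]
        simp [gAux, hm]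
      · rw [show stepA m rep (acc, true) l = (acc, true) from by simp [stepA, hm], ih]
        simp [hm]
    · cases b
      · rw [show stepA m rep (acc, false) l = (acc ++ [l], false) from by simp [stepA, hm], ih]
        simp [gAux, hm]
      · rw [show stepA m rep (acc, true) l = (acc ++ [l], true) from by simp [stepA, hm], ih]
        simp [hm]

theorem gAux_of_no_match {α : Type} (m : α → Bool) (rep : α) (lines : List α)
    (h : ∀ x ∈ lines, m x = false) : gAux m rep lines = lines := by
  induction lines with
  | nil => rfl
  | cons l ls ih =>
    have hl : m l = false := h l (List.mem_cons_self ..)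
    simp [gAux, hl, ih fun x hx => h x (List.mem_cons_of_mem _ hx)]

theorem findIdx?_le_filter_length {α : Type} (m : α → Bool) (lines : List α) (i : Nat)
    (h : lines.findIdx? m = some i) : i ≤ (lines.filter (fun l => !m l)).length := by
  induction lines generalizing i with
  | nil => simp at h
  | cons l ls ih =>
    by_cases hm : m l
    · simp [List.findIdx?_cons, hm] at h; omega
    · simp [List.findIdx?_cons, hm] at h
      obtain ⟨j, hj, rfl⟩ := h
      simpa [List.filter_cons, hm, Nat.succ_le_succ_iff] using ih j hj

theorem insert_filter_eq_gAux {α : Type} (m : α → Bool) (rep : α) (lines : List α) (i : Nat)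
    (h : lines.findIdx? m = some i) :
    PySem.List.insert (lines.filter (fun l => !m l)) (i : Int) rep = gAux m rep lines := by
  induction lines generalizing i with
  | nil => simp at h
  | cons l ls ih =>
    by_cases hm : m l
    · simp [List.findIdx?_cons, hm] at h
      subst h
      simp [PySem.List.insert_zero, hm, gAux]
    · simp [List.findIdx?_cons, hm] at h
      obtain ⟨j, hj, rfl⟩ := h
      have hle : j ≤ (ls.filter (fun l => !m l)).length := findIdx?_le_filter_length m ls j hj
      have h1 : PySem.List.insert (l :: ls.filter (fun l => !m l)) ((j + 1 : Nat) : Int) rep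
          = l :: PySem.List.insert (ls.filter (fun l => !m l)) (j : Int) rep := by
        rw [PySem.List.insert_natCast _ _ rep (by simpa using Nat.succ_le_succ hle),
            PySem.List.insert_natCast _ _ rep hle]
        simp
      simpa [List.filter_cons, hm, gAux, ih j hj] using h1

theorem listA_eq_listB {α : Type} (m : α → Bool) (rep : α) (lines : List α) :
    (if !(lines.foldl (stepA m rep) ([], false)).2
     then (lines.foldl (stepA m rep) ([], false)).1 ++ [rep]
     else (lines.foldl (stepA m rep) ([], false)).1)
    = (match lines.findIdx? m with
       | none => lines.filter (fun l => !m l) ++ [rep]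
       | some i => PySem.List.insert (lines.filter (fun l => !m l)) (i : Int) rep) := by
  rw [foldA_eq]
  cases hidx : lines.findIdx? m with
  | none =>
    have hall : ∀ x ∈ lines, m x = false := by
      rw [List.findIdx?_eq_none_iff] at hidx
      simpa using hidx
    have hnone : lines.any m = false := by
      simpa [List.any_eq_false] using hall
    have hfe : List.filter (fun l => !m l) lines = lines :=
      List.filter_eq_self.mpr (fun x hx => by simp [hall x hx])
    simp [hnone, gAux_of_no_match m rep lines hall, hfe]
  | some i =>
    have hany : lines.any m = true := by
      by_contra hc
      have hall : ∀ x ∈ lines, m x = false := by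
        simpa [List.any_eq_false] using (Bool.eq_false_iff.mpr hc)
      have hn : lines.findIdx? m = none := List.findIdx?_eq_none_iff.mpr (by simpa using hall)
      simp [hn] at hidx
    simp [hany, insert_filter_eq_gAux m rep lines i hidx]

-- ===== VERDICT (by name: the statement is the Claim_ definition above) =====
theorem set_field_py_spec : Claim_equal_set_field_py := by
  intro description key value _
  exact congrArg (fun res => pyRstripNL (PySem.Str.join "\n" res) ++ "\n")
    (listA_eq_listB (fun l => PySem.Str.startswith (PySem.Str.strip l) (key ++ ":"))
      (key ++ ": " ++ value.getD "null")
      (if description ≠ "" then PySem.Str.splitlines description else []))
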